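-- pv_equiv track=rewrite | github.com/kwnpsychogiou/algo_subj_2020 | 1stAssignment.py | CreatingGraph
-- ===== SOURCE A (Python) =====
-- def CreatingGraph(n):
--     G = {}
--     neighbors = []
--     for x in range (2-n,n):
--         for y in range (0,n):
--             if ( abs(x)+abs(y) < n ) and not( y==0 and x<0 ): #prepei sum(sintetagmenes)<5 kai gia y=o na mhn exw x<0
--                 neighbors = [(x+1,y),(x,y+1),(x-1,y),(x,y-1)] #vazw olous tous pithanous geitones kai meta tous diagrafw
--                 for (a,b) in neighbors[:]:
--                     if (( abs(a)+abs(b)>=n ) or ( b==0 and a<0 ) or (b<0)):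
--                         neighbors.remove((a,b))
--                 G[(x,y)] = neighbors[:]
--     return G
-- ===== SOURCE B (Python) =====
-- def CreatingGraph(n):
--     # Pass 0: vertices column by column from closed-form y-intervals (no filtering).
--     V = []
--     for x in range(2 - n, n):
--         for y in range(1 if x < 0 else 0, n - abs(x)):
--             V.append((x, y))
--     G = {v: [] for v in V}
--     # Pass 1: forward half-edges (east, north) append to the source's list.
--     for (x, y) in V:
--         for w in ((x + 1, y), (x, y + 1)):
--             if w in G:
--                 G[(x, y)].append(w)
--     # Pass 2: the same half-edges, mirrored, give each target its west and south entries
--     # (the west source (x-1,y) precedes the south source (x,y-1) in V's column order).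
--     for (x, y) in V:
--         for w in ((x + 1, y), (x, y + 1)):
--             if w in G:
--                 G[w].append((x, y))
--     return G
-- ===== Notes on version B (the rewrite author's own statement) =====
-- stated objective: alternative
-- what changed: B builds the vertex list from closed-form per-column y-intervals (no predicate filtering), initializes every adjacency list empty, and then fills them by enumerating only the east/north half-edges in two sweeps: a forward sweep appending each half-edge to its source, and a mirrored sweep appending it to its target, relying on column order to land the west entry before the south entry; A instead lists all four candidates per vertex and deletes invalid ones with arithmetic checks inside one double loop.
import Mathlib
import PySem

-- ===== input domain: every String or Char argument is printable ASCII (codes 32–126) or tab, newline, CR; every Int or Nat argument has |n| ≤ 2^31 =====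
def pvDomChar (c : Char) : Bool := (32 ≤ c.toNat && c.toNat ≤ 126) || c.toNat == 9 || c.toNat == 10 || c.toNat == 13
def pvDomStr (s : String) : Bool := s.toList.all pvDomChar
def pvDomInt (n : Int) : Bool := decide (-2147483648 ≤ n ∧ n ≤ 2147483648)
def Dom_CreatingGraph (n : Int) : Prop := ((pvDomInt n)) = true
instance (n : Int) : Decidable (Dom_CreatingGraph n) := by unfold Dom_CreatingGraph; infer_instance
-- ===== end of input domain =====

-- B replaces A's per-vertex candidate-removal loop by a half-edge construction: closed-form
-- column intervals give the vertices, and two sweeps over east/north half-edges fill the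
-- adjacency lists (alternative decomposition, same asymptotics).

-- ===== PORT A =====
-- the four candidate neighbors, in A's fixed order
def pvCands (x y : Int) : List (Int × Int) := [(x + 1, y), (x, y + 1), (x - 1, y), (x, y - 1)]

-- the removal condition of A's inner loop
def pvRem (n : Int) (c : Int × Int) : Bool :=
  decide ((c.1.natAbs : Int) + (c.2.natAbs : Int) ≥ n ∨ (c.2 = 0 ∧ c.1 < 0) ∨ c.2 < 0)

-- 'for (a,b) in neighbors[:]: if …: neighbors.remove((a,b))'; .getD is safe: each removed
-- element is still present (the four candidates are pairwise distinct), so Python never raises.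
def pvRemoveLoop (n : Int) (cs : List (Int × Int)) : List (Int × Int) :=
  cs.foldl (fun l c => if pvRem n c then (PySem.List.remove? l c).getD l else l) cs

def CreatingGraph (n : Int) : List (Int × Int × List (Int × Int)) :=
  let G : PySem.Dict (Int × Int) (List (Int × Int)) :=
    (PySem.List.pyRange (2 - n) n 1).foldl (fun G x =>
      (PySem.List.pyRange 0 n 1).foldl (fun G y =>
        if ((x.natAbs : Int) + (y.natAbs : Int) < n ∧ ¬(y = 0 ∧ x < 0)) then
          G.insert (x, y) (pvRemoveLoop n (pvCands x y))
        else G) G) PySem.Dict.empty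
  G.items.map (fun p => (p.1.1, p.1.2, p.2))

-- ===== PORT B =====
-- pass 0 column: 'range(1 if x < 0 else 0, n - abs(x))'
def pvColRange (n x : Int) : List Int :=
  PySem.List.pyRange (if x < 0 then 1 else 0) (n - (x.natAbs : Int)) 1

-- B's vertex list built by appends, column by column
def pvVB (n : Int) : List (Int × Int) :=
  (PySem.List.pyRange (2 - n) n 1).foldl (fun V x =>
    (pvColRange n x).foldl (fun V y => V ++ [(x, y)]) V) []

-- the two forward (east, north) candidates of B's sweeps
def pvFwd (v : Int × Int) : List (Int × Int) := [(v.1 + 1, v.2), (v.1, v.2 + 1)]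

-- 'G[v].append(w)' is ported as modify with default []; the key is always present
-- (every modified key was inserted in pass 0), so the default is never used.
def CreatingGraph_alt (n : Int) : List (Int × Int × List (Int × Int)) :=
  let V := pvVB n
  let G0 : PySem.Dict (Int × Int) (List (Int × Int)) :=
    V.foldl (fun G v => G.insert v []) PySem.Dict.empty
  let G1 := V.foldl (fun G v =>
    (pvFwd v).foldl (fun G w =>
      if G.contains w then G.modify v [] (fun l => l ++ [w]) else G) G) G0
  let G2 := V.foldl (fun G v =>
    (pvFwd v).foldl (fun G w =>
      if G.contains w then G.modify w [] (fun l => l ++ [v]) else G) G) G1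
  G2.items.map (fun p => (p.1.1, p.1.2, p.2))

-- ===== PRECONDITION & SPEC =====
def Spec_CreatingGraph (n : Int) (out : List (Int × Int × List (Int × Int))) : Prop := out = CreatingGraph_alt n
instance (n : Int) (out : List (Int × Int × List (Int × Int))) : Decidable (Spec_CreatingGraph n out) := by unfold Spec_CreatingGraph; infer_instance

-- ===== CLAIM (what is proved, stated in full; the proofs are below) =====
def Claim_equal_CreatingGraph : Prop := ∀ (n : Int), Dom_CreatingGraph n → Spec_CreatingGraph n (CreatingGraph n)

-- ===== LEMMAS AND PROOFS =====

-- vertex-admission predicate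
def pvP (n : Int) (v : Int × Int) : Prop :=
  2 - n ≤ v.1 ∧ v.1 < n ∧ 0 ≤ v.2 ∧ v.2 < n ∧
  (v.1.natAbs : Int) + (v.2.natAbs : Int) < n ∧ ¬(v.2 = 0 ∧ v.1 < 0)

def pvMemB (n : Int) (c : Int × Int) : Bool :=
  decide (2 - n ≤ c.1 ∧ c.1 < n ∧ 0 ≤ c.2 ∧ c.2 < n ∧
    (c.1.natAbs : Int) + (c.2.natAbs : Int) < n ∧ ¬(c.2 = 0 ∧ c.1 < 0))

theorem pvMemB_eq_decide_pvP (n : Int) (c : Int × Int) : (pvMemB n c = true) ↔ pvP n c := by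
  rw [pvMemB, decide_eq_true_eq, pvP]

-- the filtered comprehension form of the vertex list
def pvCol (n x : Int) : List Int :=
  (PySem.List.pyRange 0 n 1).filter
    (fun y => decide ((x.natAbs : Int) + (y.natAbs : Int) < n ∧ ¬(y = 0 ∧ x < 0)))

def pvV (n : Int) : List (Int × Int) :=
  (PySem.List.pyRange (2 - n) n 1).flatMap (fun x => (pvCol n x).map (fun y => (x, y)))

-- the canonical value both ports are proved equal to
def pvCanon (n : Int) : List (Int × Int × List (Int × Int)) :=
  (pvV n).map (fun v => (v.1, v.2, (pvCands v.1 v.2).filter (pvMemB n)))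

theorem pv_mem_V (n : Int) (v : Int × Int) : v ∈ pvV n ↔ pvP n v := by
  obtain ⟨a, b⟩ := v
  simp only [pvV, pvCol, List.mem_flatMap, List.mem_map, List.mem_filter,
    PySem.List.mem_pyRange_one, decide_eq_true_eq, Prod.mk.injEq, pvP]
  constructor
  · rintro ⟨x, hx, y, ⟨hy, hk⟩, rfl, rfl⟩
    exact ⟨hx.1, hx.2, hy.1, hy.2, hk.1, hk.2⟩
  · rintro ⟨h1, h2, h3, h4, h5, h6⟩
    exact ⟨a, ⟨h1, h2⟩, b, ⟨⟨h3, h4⟩, h5, h6⟩, rfl, rfl⟩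

theorem pv_memB_iff (n : Int) (v : Int × Int) : pvMemB n v = true ↔ v ∈ pvV n := by
  rw [pvMemB_eq_decide_pvP, pv_mem_V]

theorem pv_nodup_col (n x : Int) : (pvCol n x).Nodup :=
  (PySem.List.nodup_pyRange_one 0 n).filter _

theorem pv_nodup_V (n : Int) : (pvV n).Nodup := by
  rw [pvV, List.nodup_flatMap]
  constructor
  · intro x _
    exact (pv_nodup_col n x).map (fun a b h => by simpa using congrArg Prod.snd h)
  · refine (PySem.List.nodup_pyRange_one (2 - n) n).imp ?_
    intro x y hxy p hp hq
    simp only [List.mem_map] at hp hq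
    obtain ⟨a, _, ha⟩ := hp; obtain ⟨b, _, hb⟩ := hq
    exact hxy ((Prod.mk.injEq ..).mp (ha.trans hb.symm)).1

-- ---------- A-side: A's port equals the canonical value ----------

-- for a vertex (x,y), "not removed" = vertex admission of the candidate
theorem pv_keep_iff (n x y : Int) (h1 : 2 - n ≤ x) (h2 : x < n) (h3 : 0 ≤ y) (h4 : y < n)
    (_h5 : (x.natAbs : Int) + (y.natAbs : Int) < n) (h6 : ¬(y = 0 ∧ x < 0))
    (c : Int × Int) (hc : c ∈ pvCands x y) : ((!pvRem n c) = true) ↔ pvP n c := by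
  simp only [pvCands, List.mem_cons, List.not_mem_nil, or_false] at hc
  simp only [Bool.not_eq_true', pvRem, decide_eq_false_iff_not, pvP]
  rcases hc with rfl | rfl | rfl | rfl <;> dsimp only <;> omega

-- A's remove loop over a Nodup list is a filter
theorem pv_removeLoop_general (n : Int) (pre l : List (Int × Int)) (h : (pre ++ l).Nodup) :
    l.foldl (fun acc c => if pvRem n c then (PySem.List.remove? acc c).getD acc else acc) (pre ++ l)
      = pre ++ l.filter (fun c => !pvRem n c) := by
  induction l generalizing pre with
  | nil => simp
  | cons c l ih =>
    have hcpre : c ∉ pre := fun hmem =>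
      (List.disjoint_of_nodup_append h hmem) (List.mem_cons_self ..)
    simp only [List.foldl_cons, List.filter_cons]
    by_cases hr : pvRem n c
    · have hrem := PySem.List.remove?_eq_some_erase (pre ++ c :: l) c (by simp)
      rw [if_pos hr, hrem, Option.getD_some, List.erase_append_right _ hcpre,
        List.erase_cons_head]
      have := ih pre (h.sublist ((List.sublist_cons_self c l).append_left pre))
      simpa [hr] using this
    · rw [if_neg hr]
      have := ih (pre ++ [c]) (by simpa using h)
      simp only [hr, Bool.not_false, if_true, List.append_assoc, List.singleton_append] at this ⊢
      simpa using this

theorem pv_removeLoop_eq_filter (n x y : Int) :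
    pvRemoveLoop n (pvCands x y) = (pvCands x y).filter (fun c => !pvRem n c) := by
  have hnd : (pvCands x y).Nodup := by
    simp [pvCands, Prod.ext_iff]
    omega
  simpa using pv_removeLoop_general n [] (pvCands x y) (by simpa using hnd)

-- A's double loop with conditional insert = a fresh-key insert loop over pvV n
theorem pv_dict_eq (n : Int) :
    ((PySem.List.pyRange (2 - n) n 1).foldl (fun G x =>
      (PySem.List.pyRange 0 n 1).foldl (fun G y =>
        if ((x.natAbs : Int) + (y.natAbs : Int) < n ∧ ¬(y = 0 ∧ x < 0)) then
          G.insert (x, y) (pvRemoveLoop n (pvCands x y))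
        else G) G) (PySem.Dict.empty : PySem.Dict (Int × Int) (List (Int × Int))))
    = (pvV n).foldl (fun G v => G.insert v (pvRemoveLoop n (pvCands v.1 v.2))) PySem.Dict.empty := by
  rw [pvV, List.foldl_flatMap]
  apply PySem.List.foldl_congr_mem
  intro G x _
  rw [List.foldl_map, pvCol, List.foldl_filter]
  apply PySem.List.foldl_congr_mem
  intro G y _
  simp only [decide_eq_true_eq]

theorem pv_A_eq_canon (n : Int) : CreatingGraph n = pvCanon n := by
  unfold CreatingGraph pvCanon
  dsimp only
  rw [pv_dict_eq]
  have hitems := PySem.Dict.items_foldl_insert_fresh (pvV n) id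
    (fun v => pvRemoveLoop n (pvCands v.1 v.2)) PySem.Dict.empty
    (fun a _ => PySem.Dict.contains_empty _) (by simpa using pv_nodup_V n)
  simp only [id] at hitems
  rw [hitems]
  simp only [PySem.Dict.empty, List.nil_append, List.map_map]
  apply List.map_congr_left
  intro v hv
  simp only [Function.comp]
  rw [pv_removeLoop_eq_filter]
  congr 2
  apply List.filter_congr
  intro c hc
  obtain ⟨h1, h2, h3, h4, h5, h6⟩ := (pv_mem_V n v).1 hv
  have := pv_keep_iff n v.1 v.2 h1 h2 h3 h4 h5 h6 c hc
  rw [Bool.eq_iff_iff, this, pvMemB_eq_decide_pvP]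

-- ---------- B-side: B's port equals the canonical value ----------

-- a contiguous subrange is a filter of the full range
theorem pv_range_filter (n L H : Int) (h0 : 0 ≤ L) (hH : H ≤ n) (pred : Int → Bool)
    (hiff : ∀ y, 0 ≤ y → y < n → (pred y = true ↔ (L ≤ y ∧ y < H))) :
    PySem.List.pyRange L H 1 = (PySem.List.pyRange 0 n 1).filter pred := by
  by_cases hLH : L < H
  · rw [PySem.List.pyRange_one_append 0 L n h0 (by omega), List.filter_append,
      PySem.List.pyRange_one_append L H n (by omega) hH, List.filter_append]
    have e1 : (PySem.List.pyRange 0 L 1).filter pred = [] := by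
      rw [List.filter_eq_nil_iff]
      intro y hy
      rw [PySem.List.mem_pyRange_one] at hy
      intro hcon
      have := (hiff y (by omega) (by omega)).1 hcon
      omega
    have e2 : (PySem.List.pyRange L H 1).filter pred = PySem.List.pyRange L H 1 := by
      rw [List.filter_eq_self]
      intro y hy
      rw [PySem.List.mem_pyRange_one] at hy
      exact (hiff y (by omega) (by omega)).2 (by omega)
    have e3 : (PySem.List.pyRange H n 1).filter pred = [] := by
      rw [List.filter_eq_nil_iff]
      intro y hy
      rw [PySem.List.mem_pyRange_one] at hy
      intro hcon
      have := (hiff y (by omega) (by omega)).1 hcon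
      omega
    rw [e1, e2, e3, List.nil_append, List.append_nil]
  · rw [PySem.List.pyRange_one_eq_nil (by omega)]
    symm
    rw [List.filter_eq_nil_iff]
    intro y hy
    rw [PySem.List.mem_pyRange_one] at hy
    intro hcon
    have := (hiff y (by omega) (by omega)).1 hcon
    omega

-- pass 0's closed-form column interval is the filtered column
theorem pv_col_eq (n x : Int) : pvColRange n x = pvCol n x := by
  unfold pvColRange pvCol
  apply pv_range_filter
  · split <;> omega
  · omega
  · intro y h0y hyn
    rw [decide_eq_true_eq]
    by_cases hx : x < 0
    · rw [if_pos hx]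
      constructor
      · rintro ⟨hlt, hno⟩
        constructor
        · rcases Int.lt_or_le 0 y with h | h
          · omega
          · interval_cases y
            exact absurd ⟨rfl, hx⟩ hno
        · omega
      · rintro ⟨h1y, hyH⟩
        exact ⟨by omega, by omega⟩
    · rw [if_neg hx]
      constructor
      · rintro ⟨hlt, _⟩
        exact ⟨h0y, by omega⟩
      · rintro ⟨_, hyH⟩
        exact ⟨by omega, by rintro ⟨_, hx0⟩; exact hx hx0⟩

-- B's append loops build exactly the comprehension list
theorem pv_VB_eq_V (n : Int) : pvVB n = pvV n := by
  unfold pvVB pvV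
  have h1 := PySem.List.foldl_congr_mem
    (l := PySem.List.pyRange (2 - n) n 1) (init := ([] : List (Int × Int)))
    (f := fun V x => (pvColRange n x).foldl (fun V y => V ++ [(x, y)]) V)
    (g := fun V x => V ++ (pvColRange n x).map (fun y => (x, y)))
    (by intro acc x _
        dsimp only
        rw [PySem.List.foldl_append_singleton_eq_map])
  rw [h1, PySem.List.foldl_append_eq_flatMap, List.nil_append]
  exact List.flatMap_congr (fun x _ => by rw [pv_col_eq])

-- the op record of one conditional append: (checked key, modified key, payload)
def pvStepD (G : PySem.Dict (Int × Int) (List (Int × Int)))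
    (o : (Int × Int) × (Int × Int) × (Int × Int)) : PySem.Dict (Int × Int) (List (Int × Int)) :=
  if G.contains o.1 then G.modify o.2.1 [] (fun l => l ++ [o.2.2]) else G

def pvStepS (G : PySem.Dict (Int × Int) (List (Int × Int)))
    (o : (Int × Int) × (Int × Int) × (Int × Int)) : PySem.Dict (Int × Int) (List (Int × Int)) :=
  G.modify o.2.1 [] (fun l => l ++ [o.2.2])

def pvOps1 (n : Int) : List ((Int × Int) × (Int × Int) × (Int × Int)) :=
  (pvV n).flatMap (fun v => (pvFwd v).map (fun w => (w, v, w)))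

def pvOps2 (n : Int) : List ((Int × Int) × (Int × Int) × (Int × Int)) :=
  (pvV n).flatMap (fun v => (pvFwd v).map (fun w => (w, w, v)))

-- the dynamic contains-guarded fold is the static filtered fold (keys never change)
theorem pv_dyn_static (m : (Int × Int) → Bool) :
    ∀ (ops : List ((Int × Int) × (Int × Int) × (Int × Int)))
      (G : PySem.Dict (Int × Int) (List (Int × Int))),
      (∀ w, G.contains w = m w) →
      (∀ o ∈ ops, m o.2.1 = true ∨ o.2.1 = o.1) →
      ops.foldl pvStepD G = (ops.filter (fun o => m o.1)).foldl pvStepS G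
      ∧ ∀ w, (ops.foldl pvStepD G).contains w = m w := by
  intro ops
  induction ops with
  | nil => intro G hC _; exact ⟨rfl, hC⟩
  | cons o ops ih =>
    intro G hC hops
    by_cases h : m o.1 = true
    · have hstep : pvStepD G o = pvStepS G o := by
        rw [pvStepD, pvStepS, if_pos (by rw [hC]; exact h)]
      have hC' : ∀ w, (pvStepS G o).contains w = m w := by
        intro w
        rw [pvStepS, PySem.Dict.contains_modify]
        by_cases hw : w = o.2.1
        · subst hw
          simp only [BEq.rfl, Bool.true_or]
          rcases hops o (List.mem_cons_self ..) with hm | he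
          · exact hm.symm
          · rw [he]; exact h.symm
        · simp only [beq_eq_false_iff_ne.2 hw, Bool.false_or]
          exact hC w
      have := ih (pvStepS G o) hC' (fun o' ho' => hops o' (List.mem_cons_of_mem _ ho'))
      simp only [List.foldl_cons, List.filter_cons, h, if_true, hstep]
      exact this
    · have hstep : pvStepD G o = G := by
        rw [pvStepD, if_neg (by rw [hC o.1]; exact h)]
      have := ih G hC (fun o' ho' => hops o' (List.mem_cons_of_mem _ ho'))
      simp only [List.foldl_cons, List.filter_cons, h, if_false, hstep, Bool.false_eq_true]
      exact this

-- B's two sweeps are folds of pvStepD over the op lists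
theorem pv_sweep1_eq (n : Int) (G : PySem.Dict (Int × Int) (List (Int × Int))) :
    (pvV n).foldl (fun G v =>
      (pvFwd v).foldl (fun G w =>
        if G.contains w then G.modify v [] (fun l => l ++ [w]) else G) G) G
    = (pvOps1 n).foldl pvStepD G := by
  rw [pvOps1, List.foldl_flatMap]
  apply PySem.List.foldl_congr_mem
  intro acc v _
  rw [List.foldl_map]
  rfl

theorem pv_sweep2_eq (n : Int) (G : PySem.Dict (Int × Int) (List (Int × Int))) :
    (pvV n).foldl (fun G v =>
      (pvFwd v).foldl (fun G w =>
        if G.contains w then G.modify w [] (fun l => l ++ [v]) else G) G) G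
    = (pvOps2 n).foldl pvStepD G := by
  rw [pvOps2, List.foldl_flatMap]
  apply PySem.List.foldl_congr_mem
  intro acc v _
  rw [List.foldl_map]
  rfl

-- flatMap of a function vanishing except at one element of a Nodup list
theorem pv_flatMap_single {α β : Type} [DecidableEq α] (l : List α) (hnd : l.Nodup)
    (v : α) (hv : v ∈ l) (g : α → List β) (h0 : ∀ u ∈ l, u ≠ v → g u = []) :
    l.flatMap g = g v := by
  induction l with
  | nil => cases hv
  | cons a l ih =>
    rcases List.mem_cons.1 hv with rfl | hv'
    · have : l.flatMap g = [] := by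
        rw [List.flatMap_eq_nil_iff]
        intro u hu
        exact h0 u (List.mem_cons_of_mem _ hu) (fun he => (List.nodup_cons.1 hnd).1 (he ▸ hu))
      simp [this]
    · have ha : g a = [] := h0 a (List.mem_cons_self ..) (fun he => (List.nodup_cons.1 hnd).1 (he ▸ hv'))
      simp only [List.flatMap_cons, ha, List.nil_append]
      exact ih (List.nodup_cons.1 hnd).2 hv' (fun u hu hne => h0 u (List.mem_cons_of_mem _ hu) hne)

-- flatMap of a function vanishing except at q, over a Nodup list
theorem pv_flatMap_one {β : Type} (xs : List Int) (hnd : xs.Nodup) (q : Int)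
    (g : Int → List β) (h0 : ∀ x ∈ xs, x ≠ q → g x = []) :
    xs.flatMap g = if q ∈ xs then g q else [] := by
  induction xs with
  | nil => simp
  | cons a xs ih =>
    rcases List.nodup_cons.1 hnd with ⟨ha, hnd'⟩
    by_cases haq : a = q
    · subst haq
      have hrest : xs.flatMap g = [] := by
        rw [List.flatMap_eq_nil_iff]
        intro x hx
        exact h0 x (List.mem_cons_of_mem _ hx) (fun he => ha (he ▸ hx))
      rw [List.flatMap_cons, hrest, List.append_nil, if_pos (List.mem_cons_self ..)]
    · have hga : g a = [] := h0 a (List.mem_cons_self ..) haq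
      rw [List.flatMap_cons, hga, List.nil_append,
        ih hnd' (fun x hx hne => h0 x (List.mem_cons_of_mem _ hx) hne)]
      have hmemiff : (q ∈ a :: xs) ↔ q ∈ xs := by
        rw [List.mem_cons]
        exact or_iff_right (fun h => haq h.symm)
      exact (if_congr hmemiff.symm rfl rfl)

-- flatMap of a function vanishing except at p < q, over a strictly increasing list
theorem pv_flatMap_two {β : Type} (xs : List Int) (hp : xs.Pairwise (· < ·)) (p q : Int)
    (hpq : p < q) (g : Int → List β) (h0 : ∀ x ∈ xs, x ≠ p → x ≠ q → g x = []) :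
    xs.flatMap g = (if p ∈ xs then g p else []) ++ (if q ∈ xs then g q else []) := by
  induction xs with
  | nil => simp
  | cons a xs ih =>
    rcases List.pairwise_cons.1 hp with ⟨hlt, hp'⟩
    have hnd' : xs.Nodup := hp'.imp (fun h => Int.ne_of_lt h)
    by_cases hap : a = p
    · subst hap
      rw [List.flatMap_cons,
        pv_flatMap_one xs hnd' q g
          (fun x hx hxq => h0 x (List.mem_cons_of_mem _ hx)
            (fun he => absurd (hlt x hx) (by omega)) hxq)]
      have hqiff : (q ∈ a :: xs) ↔ q ∈ xs := by
        rw [List.mem_cons]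
        exact or_iff_right (by omega)
      rw [if_pos (List.mem_cons_self ..), if_congr hqiff rfl rfl]
    · by_cases haq : a = q
      · subst haq
        have hanotin : a ∉ xs := fun h => absurd (hlt a h) (lt_irrefl a)
        have hrest : xs.flatMap g = [] := by
          rw [List.flatMap_eq_nil_iff]
          intro x hx
          exact h0 x (List.mem_cons_of_mem _ hx) (by have := hlt x hx; omega)
            (by have := hlt x hx; omega)
        have hpni : p ∉ a :: xs := by
          intro hmem
          rcases List.mem_cons.1 hmem with rfl | h
          · omega
          · have := hlt p h; omega
        rw [List.flatMap_cons, hrest, List.append_nil, if_neg hpni,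
          if_pos (List.mem_cons_self ..), List.nil_append]
      · have hga : g a = [] := h0 a (List.mem_cons_self ..) hap haq
        rw [List.flatMap_cons, hga, List.nil_append,
          ih hp' (fun x hx => h0 x (List.mem_cons_of_mem _ hx))]
        have h1 : (p ∈ a :: xs) ↔ (p ∈ xs) := by
          rw [List.mem_cons]
          exact or_iff_right (fun h => hap h.symm)
        have h2 : (q ∈ a :: xs) ↔ (q ∈ xs) := by
          rw [List.mem_cons]
          exact or_iff_right (fun h => haq h.symm)
        rw [if_congr h1.symm rfl rfl, if_congr h2.symm rfl rfl]

-- filtering a Nodup list for equality with one element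
theorem pv_filter_beq_nodup {α : Type} [BEq α] [LawfulBEq α] (l : List α) (hnd : l.Nodup) (a : α) :
    l.filter (· == a) = if a ∈ l then [a] else [] := by
  rw [List.filter_beq]
  by_cases h : a ∈ l
  · rw [if_pos h, List.count_eq_one_of_mem hnd h, List.replicate_one]
  · rw [if_neg h, List.count_eq_zero_of_not_mem h, List.replicate_zero]

-- picking two vertices out of pvV, in column order
theorem pv_filter_two (n : Int) (a b : Int × Int) (hab : a.1 < b.1) :
    (pvV n).filter (fun u => u == a || u == b)
    = (if pvMemB n a then [a] else []) ++ (if pvMemB n b then [b] else []) := by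
  rw [pvV, List.filter_flatMap]
  have hcolmem : ∀ x (u : Int × Int), u ∈ (pvCol n x).map (fun y => (x, y)) → u.1 = x := by
    intro x u hu
    rcases List.mem_map.1 hu with ⟨y, _, rfl⟩
    rfl
  have hcolfilter : ∀ (c : Int × Int),
      ((pvCol n c.1).map (fun y => (c.1, y))).filter (· == c)
        = if c ∈ (pvCol n c.1).map (fun y => (c.1, y)) then [c] else [] := by
    intro c
    apply pv_filter_beq_nodup
    exact (pv_nodup_col n c.1).map (fun y z h => by simpa using congrArg Prod.snd h)
  have hg : ∀ x, ((pvCol n x).map (fun y => (x, y))).filter (fun u => u == a || u == b)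
      = (if x = a.1 then ((pvCol n x).map (fun y => (x, y))).filter (· == a) else []) ++
        (if x = b.1 then ((pvCol n x).map (fun y => (x, y))).filter (· == b) else []) := by
    intro x
    by_cases hxa : x = a.1
    · subst hxa
      rw [if_pos rfl, if_neg (by omega), List.append_nil]
      apply List.filter_congr
      intro u hu
      have := hcolmem _ u hu
      have hub : (u == b) = false := by
        rw [beq_eq_false_iff_ne]
        intro he
        rw [he] at this
        omega
      rw [hub, Bool.or_false]
    · rw [if_neg hxa]
      by_cases hxb : x = b.1
      · subst hxb
        rw [if_pos rfl, List.nil_append]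
        apply List.filter_congr
        intro u hu
        have := hcolmem _ u hu
        have hua : (u == a) = false := by
          rw [beq_eq_false_iff_ne]
          intro he
          rw [he] at this
          omega
        rw [hua, Bool.false_or]
      · rw [if_neg hxb, List.append_nil]
        rw [List.filter_eq_nil_iff]
        intro u hu
        have := hcolmem _ u hu
        simp only [Bool.or_eq_true, beq_iff_eq, not_or]
        constructor
        · intro he; rw [he] at this; exact hxa this.symm
        · intro he; rw [he] at this; exact hxb this.symm
  calc (PySem.List.pyRange (2 - n) n 1).flatMap
        (fun x => ((pvCol n x).map (fun y => (x, y))).filter (fun u => u == a || u == b))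
      = (if a.1 ∈ PySem.List.pyRange (2 - n) n 1
          then ((pvCol n a.1).map (fun y => (a.1, y))).filter (fun u => u == a || u == b) else [])
        ++ (if b.1 ∈ PySem.List.pyRange (2 - n) n 1
          then ((pvCol n b.1).map (fun y => (b.1, y))).filter (fun u => u == a || u == b) else []) := by
        apply pv_flatMap_two _ (PySem.List.pairwise_lt_pyRange_one (2 - n) n) a.1 b.1 hab
        intro x hx hxa hxb
        rw [hg x, if_neg hxa, if_neg hxb]
        rfl
    _ = _ := by
        have ha' : (if a.1 ∈ PySem.List.pyRange (2 - n) n 1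
            then ((pvCol n a.1).map (fun y => (a.1, y))).filter (fun u => u == a || u == b) else [])
            = (if pvMemB n a then [a] else []) := by
          by_cases hmB : pvMemB n a = true
          · have hainV : a ∈ pvV n := (pv_memB_iff n a).1 hmB
            rw [pvV] at hainV
            rcases List.mem_flatMap.1 hainV with ⟨x, hx, hcolx⟩
            have hx1 : a.1 = x := hcolmem x a hcolx
            subst hx1
            rw [if_pos hx, hg a.1, if_pos rfl, if_neg (by omega), List.append_nil,
              hcolfilter a, if_pos hcolx, if_pos hmB]
          · rw [if_neg hmB]
            by_cases hA : a.1 ∈ PySem.List.pyRange (2 - n) n 1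
            · have hnc : a ∉ (pvCol n a.1).map (fun y => (a.1, y)) := by
                intro hc
                exact hmB ((pv_memB_iff n a).2 (by
                  rw [pvV]; exact List.mem_flatMap.2 ⟨a.1, hA, hc⟩))
              rw [if_pos hA, hg a.1, if_pos rfl, if_neg (by omega), List.append_nil,
                hcolfilter a, if_neg hnc]
            · rw [if_neg hA]
        have hb' : (if b.1 ∈ PySem.List.pyRange (2 - n) n 1
            then ((pvCol n b.1).map (fun y => (b.1, y))).filter (fun u => u == a || u == b) else [])
            = (if pvMemB n b then [b] else []) := by
          by_cases hmB : pvMemB n b = true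
          · have hbinV : b ∈ pvV n := (pv_memB_iff n b).1 hmB
            rw [pvV] at hbinV
            rcases List.mem_flatMap.1 hbinV with ⟨x, hx, hcolx⟩
            have hx1 : b.1 = x := hcolmem x b hcolx
            subst hx1
            rw [if_pos hx, hg b.1, if_neg (by omega), if_pos rfl, List.nil_append,
              hcolfilter b, if_pos hcolx, if_pos hmB]
          · rw [if_neg hmB]
            by_cases hB : b.1 ∈ PySem.List.pyRange (2 - n) n 1
            · have hnc : b ∉ (pvCol n b.1).map (fun y => (b.1, y)) := by
                intro hc
                exact hmB ((pv_memB_iff n b).2 (by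
                  rw [pvV]; exact List.mem_flatMap.2 ⟨b.1, hB, hc⟩))
              rw [if_pos hB, hg b.1, if_neg (by omega), if_pos rfl, List.nil_append,
                hcolfilter b, if_neg hnc]
            · rw [if_neg hB]
        rw [ha', hb']

-- the per-vertex payload collected from the executed ops
theorem pv_value_eq (n : Int) (v : Int × Int) (hv : v ∈ pvV n) :
    ((((pvOps1 n ++ pvOps2 n).filter (fun o => pvMemB n o.1)).map
        (fun o => (o.2.1, o.2.2))).filter (fun p => p.1 == v)).map (fun p => p.2)
    = (pvCands v.1 v.2).filter (pvMemB n) := by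
  rw [List.filter_map]
  rw [List.map_map]
  have hcomb : ∀ (l : List ((Int × Int) × (Int × Int) × (Int × Int))),
      ((l.filter (fun o => pvMemB n o.1)).filter
        ((fun p => p.1 == v) ∘ (fun o => (o.2.1, o.2.2))))
      = l.filter (fun o => pvMemB n o.1 && (o.2.1 == v)) := by
    intro l
    rw [List.filter_filter]
    apply List.filter_congr
    intro o _
    simp [Function.comp, Bool.and_comm]
  rw [hcomb, List.filter_append, List.map_append,
    show ((fun (p : (Int × Int) × (Int × Int)) => p.2) ∘
      fun (o : (Int × Int) × (Int × Int) × (Int × Int)) => (o.2.1, o.2.2)) = fun o => o.2.2 from rfl]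
  have hmemv : pvMemB n v = true := (pv_memB_iff n v).2 hv
  -- part 1: ops1 contributes v's own east/north candidates that are vertices
  have h1 : ((pvOps1 n).filter (fun o => pvMemB n o.1 && (o.2.1 == v))).map (fun o => o.2.2)
      = (pvFwd v).filter (pvMemB n) := by
    rw [pvOps1, List.filter_flatMap]
    rw [pv_flatMap_single (pvV n) (pv_nodup_V n) v hv _
      (by intro u hu hne
          rw [List.filter_map, List.filter_eq_nil_iff.2, List.map_nil]
          intro w _
          simp only [Function.comp, Bool.and_eq_true, beq_iff_eq, not_and]
          intro _ he
          exact absurd he hne)]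
    rw [List.filter_map, List.map_map]
    have : ((pvFwd v).filter ((fun o => pvMemB n o.1 && (o.2.1 == v)) ∘ fun w => (w, v, w)))
        = (pvFwd v).filter (pvMemB n) := by
      apply List.filter_congr
      intro w _
      simp [Function.comp]
    rw [this]
    rw [show ((fun (o : (Int × Int) × (Int × Int) × (Int × Int)) => o.2.2) ∘
        fun w => (w, v, w)) = id from rfl, List.map_id]
  -- part 2: ops2 contributes the west and south sources, in column order
  have h2 : ((pvOps2 n).filter (fun o => pvMemB n o.1 && (o.2.1 == v))).map (fun o => o.2.2)
      = [(v.1 - 1, v.2), (v.1, v.2 - 1)].filter (pvMemB n) := by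
    rw [pvOps2, List.filter_flatMap]
    have hper : ∀ u ∈ pvV n,
        (((pvFwd u).map (fun w => (w, w, u))).filter (fun o => pvMemB n o.1 && (o.2.1 == v)))
        = ((pvFwd u).filter (fun w => w == v)).map (fun w => (w, w, u)) := by
      intro u _
      rw [List.filter_map]
      congr 1
      apply List.filter_congr
      intro w _
      simp only [Function.comp]
      by_cases hwv : w = v
      · subst hwv
        simp [hmemv]
      · simp [beq_eq_false_iff_ne.2 hwv]
    have hflat : (pvV n).flatMap (fun u =>
        (((pvFwd u).map (fun w => (w, w, u))).filter (fun o => pvMemB n o.1 && (o.2.1 == v))))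
        = (pvV n).flatMap (fun u => ((pvFwd u).filter (fun w => w == v)).map (fun w => (w, w, u))) :=
      List.flatMap_congr hper
    rw [hflat]
    have hsingle : ∀ u : Int × Int, (pvFwd u).filter (fun w => w == v)
        = if (u == (v.1 - 1, v.2) || u == (v.1, v.2 - 1)) then [v] else [] := by
      intro u
      obtain ⟨p, q⟩ := u
      obtain ⟨r, s⟩ := v
      simp only [pvFwd, List.filter_cons, List.filter_nil]
      by_cases h1' : ((p + 1, q) : Int × Int) = (r, s)
      · have : ¬ ((p, q + 1) : Int × Int) = (r, s) := by
          rw [Prod.mk.injEq] at h1' ⊢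
          omega
        rw [if_pos (by exact beq_iff_eq.2 h1'), if_neg (by simpa using this)]
        have : ((p, q) : Int × Int) = (r - 1, s) := by
          rw [Prod.mk.injEq] at h1' ⊢
          omega
        rw [if_pos (by simp [this]), Prod.mk.injEq] at *
        simp_all
      · rw [if_neg (by simpa using h1')]
        by_cases h2' : ((p, q + 1) : Int × Int) = (r, s)
        · rw [if_pos (by exact beq_iff_eq.2 h2')]
          have ha : ¬ ((p, q) : Int × Int) = (r - 1, s) := by
            rw [Prod.mk.injEq] at h2' ⊢
            omega
          have hb : ((p, q) : Int × Int) = (r, s - 1) := by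
            rw [Prod.mk.injEq] at h2' ⊢
            omega
          rw [if_pos]
          · rw [Prod.mk.injEq] at h2'
            have : s = q + 1 := by omega
            simp [h2'.1.symm, this]
          · simp [hb]
        · rw [if_neg (by simpa using h2'), if_neg]
          simp only [Bool.or_eq_true, beq_iff_eq, not_or, Prod.mk.injEq] at *
          constructor <;> (rintro ⟨he1, he2⟩; omega)
    have hflat2 : (pvV n).flatMap (fun u => ((pvFwd u).filter (fun w => w == v)).map (fun w => (w, w, u)))
        = (pvV n).flatMap (fun u =>
            if (u == (v.1 - 1, v.2) || u == (v.1, v.2 - 1)) then [(v, v, u)] else []) := by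
      apply List.flatMap_congr
      intro u _
      rw [hsingle u]
      by_cases h : (u == (v.1 - 1, v.2) || u == (v.1, v.2 - 1)) = true
      · rw [if_pos h, if_pos h]; rfl
      · rw [if_neg h, if_neg h]; rfl
    rw [hflat2]
    have hfilter : (pvV n).flatMap (fun u =>
        if (u == (v.1 - 1, v.2) || u == (v.1, v.2 - 1)) then [(v, v, u)] else [])
        = ((pvV n).filter (fun u => u == (v.1 - 1, v.2) || u == (v.1, v.2 - 1))).map
            (fun u => ((v, v, u) : (Int × Int) × (Int × Int) × (Int × Int))) := by
      induction pvV n with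
      | nil => rfl
      | cons a l ih =>
        rw [List.flatMap_cons, List.filter_cons]
        by_cases h : (a == (v.1 - 1, v.2) || a == (v.1, v.2 - 1)) = true
        · rw [if_pos h, if_pos h, List.map_cons, ih]
          rfl
        · rw [if_neg h, if_neg h, ih]
          rfl
    rw [hfilter, pv_filter_two n (v.1 - 1, v.2) (v.1, v.2 - 1) (by omega)]
    by_cases ha : pvMemB n (v.1 - 1, v.2) = true <;>
      by_cases hb : pvMemB n (v.1, v.2 - 1) = true <;>
        simp [ha, hb]
  rw [h1, h2]
  have : pvCands v.1 v.2 = pvFwd v ++ [(v.1 - 1, v.2), (v.1, v.2 - 1)] := rfl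
  rw [this, List.filter_append]

-- the whole of B equals the canonical value
theorem pv_B_eq_canon (n : Int) : CreatingGraph_alt n = pvCanon n := by
  unfold CreatingGraph_alt
  dsimp only
  rw [pv_VB_eq_V]
  -- pass 0
  have hitems0 := PySem.Dict.items_foldl_insert_fresh (pvV n) id
    (fun _ => ([] : List (Int × Int))) PySem.Dict.empty
    (fun a _ => PySem.Dict.contains_empty _) (by simpa using pv_nodup_V n)
  simp only [id] at hitems0
  set G0 : PySem.Dict (Int × Int) (List (Int × Int)) :=
    (pvV n).foldl (fun G v => G.insert v []) PySem.Dict.empty with hG0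
  have hitemsG0 : G0.items = (pvV n).map (fun v => (v, [])) := by
    rw [hG0, hitems0]; rfl
  have hkeysG0 : G0.keys = pvV n := by
    simp only [PySem.Dict.keys, hitemsG0, List.map_map]
    exact List.map_id _
  have hndk : G0.keys.Nodup := by rw [hkeysG0]; exact pv_nodup_V n
  have hC0 : ∀ w, G0.contains w = pvMemB n w := by
    intro w
    rw [Bool.eq_iff_iff, PySem.Dict.contains_iff_mem_keys, hkeysG0, pv_memB_iff]
  -- sweeps as one static op fold
  rw [pv_sweep1_eq, pv_sweep2_eq, ← List.foldl_append]
  have hops : ∀ o ∈ pvOps1 n ++ pvOps2 n, pvMemB n o.2.1 = true ∨ o.2.1 = o.1 := by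
    intro o ho
    rcases List.mem_append.1 ho with h | h
    · left
      rw [pvOps1, List.mem_flatMap] at h
      obtain ⟨u, hu, hw⟩ := h
      rcases List.mem_map.1 hw with ⟨w, _, rfl⟩
      exact (pv_memB_iff n u).2 hu
    · right
      rw [pvOps2, List.mem_flatMap] at h
      obtain ⟨u, hu, hw⟩ := h
      rcases List.mem_map.1 hw with ⟨w, _, rfl⟩
      rfl
  rw [(pv_dyn_static (pvMemB n) (pvOps1 n ++ pvOps2 n) G0 hC0 hops).1]
  set L := (pvOps1 n ++ pvOps2 n).filter (fun o => pvMemB n o.1) with hLdef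
  have hkeyV : ∀ o ∈ L, o.2.1 ∈ pvV n := by
    intro o ho
    rcases List.mem_filter.1 ho with ⟨hmem, hm⟩
    rcases hops o hmem with h | h
    · exact (pv_memB_iff n o.2.1).1 h
    · rw [h]; exact (pv_memB_iff n o.1).1 hm
  have hfold : L.foldl pvStepS G0
      = (L.map (fun o => (o.2.1, o.2.2))).foldl
          (fun d p => d.modify p.1 [] (fun x => x ++ [p.2])) G0 := by
    rw [List.foldl_map]
    rfl
  rw [hfold]
  set G2 := (L.map (fun o => (o.2.1, o.2.2))).foldl
      (fun d p => d.modify p.1 [] (fun x => x ++ [p.2])) G0 with hG2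
  have hkeys2 : G2.keys = pvV n := by
    rw [hG2]
    rw [PySem.Dict.keys_foldl_modify_key (L.map (fun o => (o.2.1, o.2.2))) Prod.fst []
      (fun _ p => fun x => x ++ [p.2]) G0]
    rw [PySem.Set.update_eq_append_filter]
    have : (PySem.Set.ofList ((L.map (fun o => (o.2.1, o.2.2))).map Prod.fst)).filter
        (fun y => !PySem.Set.contains G0.keys y) = [] := by
      rw [List.filter_eq_nil_iff]
      intro k hk
      have hkmem : k ∈ (L.map (fun o => (o.2.1, o.2.2))).map Prod.fst := by
        have := (PySem.Set.mem_ofList _ _).1 hk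
        exact this
      simp only [List.map_map, List.mem_map] at hkmem
      obtain ⟨o, ho, rfl⟩ := hkmem
      have : PySem.Set.contains G0.keys (o.2.1, o.2.2).1 = true := by
        rw [PySem.Set.contains_iff, hkeysG0]
        exact hkeyV o ho
      simp
      rw [hkeysG0]
      exact hkeyV o ho
    rw [this, List.append_nil, hkeysG0]
  have hndk2 : G2.keys.Nodup := by rw [hkeys2]; exact pv_nodup_V n
  have hitems2 : G2.items = (pvV n).map (fun v => (v, G2.getD v [])) := by
    rw [PySem.Dict.items_eq_map_keys G2 hndk2 [], hkeys2]
  have hgd : ∀ v ∈ pvV n, G2.getD v []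
      = (((L.map (fun o => (o.2.1, o.2.2))).filter (fun p => p.1 == v)).map (fun p => p.2)) := by
    intro v hv
    rw [hG2, PySem.Dict.getD_foldl_modify_append]
    have : G0.getD v [] = [] := by
      apply PySem.Dict.getD_of_mem_items G0 _ hndk
      rw [hitemsG0]
      exact List.mem_map.2 ⟨v, hv, rfl⟩
    rw [this, List.nil_append]
  rw [hitems2, List.map_map, pvCanon]
  apply List.map_congr_left
  intro v hv
  simp only [Function.comp]
  rw [hgd v hv, hLdef, pv_value_eq n v hv]

-- ===== VERDICT (by name: the statement is the Claim_ definition above) =====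
theorem CreatingGraph_spec : Claim_equal_CreatingGraph := by
  intro n _
  unfold Spec_CreatingGraph
  rw [pv_A_eq_canon, pv_B_eq_canon]
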